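-- pv_equiv track=rewrite | github.com/Soujatya1/Web-Intel-Bot | streamlit_app.py | format_document_links_for_embedding
-- ===== SOURCE A (Python) =====
-- def format_document_links_for_embedding(document_links):
--     if not document_links:
--         return ""
--
--     formatted_links = "\n\n=== RELEVANT DOCUMENT LINKS ===\n"
--
--     content_docs = [link for link in document_links if link['type'] == 'content']
--     ref_docs = [link for link in document_links if link['type'] == 'reference']
--
--     if content_docs:
--         formatted_links += "\n[CONTENT PAGES]\n"
--         for i, link_info in enumerate(content_docs, 1):
--             formatted_links += f"{i}. {link_info['title']} - {link_info['link']}\n"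
--
--     if ref_docs:
--         formatted_links += "\n[REFERENCE DOCUMENTS]\n"
--         for i, link_info in enumerate(ref_docs, 1):
--             formatted_links += f"{i}. {link_info['title']} - {link_info['link']}\n"
--
--     formatted_links += "=== END DOCUMENT LINKS ===\n\n"
--
--     return formatted_links
-- ===== SOURCE B (Python) =====
-- def format_document_links_for_embedding(document_links):
--     if not document_links:
--         return ""
--     # single pass: number and render each link into its section body on the fly
--     ci = ri = 0
--     cbody = rbody = ""
--     for link in document_links:
--         t = link['type']
--         if t == 'content':
--             ci += 1
--             cbody += f"{ci}. {link['title']} - {link['link']}\n"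
--         elif t == 'reference':
--             ri += 1
--             rbody += f"{ri}. {link['title']} - {link['link']}\n"
--     out = "\n\n=== RELEVANT DOCUMENT LINKS ===\n"
--     if ci:
--         out += "\n[CONTENT PAGES]\n" + cbody
--     if ri:
--         out += "\n[REFERENCE DOCUMENTS]\n" + rbody
--     return out + "=== END DOCUMENT LINKS ===\n\n"
-- ===== Notes on version B (the rewrite author's own statement) =====
-- stated objective: alternative
-- what changed: Replaces A's staged design (two filtering comprehensions producing intermediate lists, then two enumerate loops over them) with a single interleaved pass that keeps per-section counters and directly accumulates each section's numbered body as it meets each link, assembling headers and bodies only at the end.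
import Mathlib
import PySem

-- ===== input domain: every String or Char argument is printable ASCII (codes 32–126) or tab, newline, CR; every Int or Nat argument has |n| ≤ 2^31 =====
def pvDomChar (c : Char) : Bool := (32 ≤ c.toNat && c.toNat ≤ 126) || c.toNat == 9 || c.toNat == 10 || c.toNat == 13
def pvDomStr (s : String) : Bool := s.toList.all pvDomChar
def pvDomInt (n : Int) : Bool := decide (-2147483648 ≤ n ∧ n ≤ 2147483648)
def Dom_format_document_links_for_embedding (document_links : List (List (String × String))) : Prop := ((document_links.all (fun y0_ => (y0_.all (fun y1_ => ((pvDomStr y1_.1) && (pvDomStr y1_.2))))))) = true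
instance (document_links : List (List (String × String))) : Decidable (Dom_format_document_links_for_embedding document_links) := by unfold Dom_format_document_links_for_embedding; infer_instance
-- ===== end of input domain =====

-- B replaces A's staged design (two filtering passes, then two enumerate loops over the
-- intermediate lists) with one interleaved pass keeping per-section counters and bodies
-- (objective: alternative decomposition, same cost).

-- ===== PORT A =====
def format_document_links_for_embedding (document_links : List (List (String × String))) : String :=
  if document_links = [] then ""
  else
    let formatted0 : String := "\n\n=== RELEVANT DOCUMENT LINKS ===\n"
    let content_docs := document_links.filter (fun link => ((link.lookup "type").getD "") == "content")
    let ref_docs := document_links.filter (fun link => ((link.lookup "type").getD "") == "reference")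
    let formatted1 : String :=
      if content_docs = [] then formatted0
      else (content_docs.foldl
        (fun (p : Int × String) link_info =>
          (p.1 + 1, p.2 ++ PySem.Int.toStr p.1 ++ ". " ++ ((link_info.lookup "title").getD "") ++ " - " ++ ((link_info.lookup "link").getD "") ++ "\n"))
        (1, formatted0 ++ "\n[CONTENT PAGES]\n")).2
    let formatted2 : String :=
      if ref_docs = [] then formatted1
      else (ref_docs.foldl
        (fun (p : Int × String) link_info =>
          (p.1 + 1, p.2 ++ PySem.Int.toStr p.1 ++ ". " ++ ((link_info.lookup "title").getD "") ++ " - " ++ ((link_info.lookup "link").getD "") ++ "\n"))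
        (1, formatted1 ++ "\n[REFERENCE DOCUMENTS]\n")).2
    formatted2 ++ "=== END DOCUMENT LINKS ===\n\n"

-- ===== PORT B =====
def format_document_links_for_embedding_alt (document_links : List (List (String × String))) : String :=
  if document_links = [] then ""
  else
    let st : Int × Int × String × String :=
      document_links.foldl
        (fun (s : Int × Int × String × String) link =>
          let t := (link.lookup "type").getD ""
          if t == "content" then
            (s.1 + 1, s.2.1,
             s.2.2.1 ++ PySem.Int.toStr (s.1 + 1) ++ ". " ++ ((link.lookup "title").getD "") ++ " - " ++ ((link.lookup "link").getD "") ++ "\n",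
             s.2.2.2)
          else if t == "reference" then
            (s.1, s.2.1 + 1, s.2.2.1,
             s.2.2.2 ++ PySem.Int.toStr (s.2.1 + 1) ++ ". " ++ ((link.lookup "title").getD "") ++ " - " ++ ((link.lookup "link").getD "") ++ "\n")
          else s)
        (0, 0, "", "")
    let out0 : String := "\n\n=== RELEVANT DOCUMENT LINKS ===\n"
    let out1 : String := if st.1 = 0 then out0 else out0 ++ "\n[CONTENT PAGES]\n" ++ st.2.2.1
    let out2 : String := if st.2.1 = 0 then out1 else out1 ++ "\n[REFERENCE DOCUMENTS]\n" ++ st.2.2.2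
    out2 ++ "=== END DOCUMENT LINKS ===\n\n"

-- ===== PRECONDITION & SPEC =====
-- Pre_ excludes exactly the inputs where Python A raises KeyError: a link without a
-- 'type' key, or a 'content'/'reference' link without a 'title' or 'link' key.
def Pre_format_document_links_for_embedding (document_links : List (List (String × String))) : Prop :=
  ∀ link ∈ document_links, link.lookup "type" ≠ none ∧
    ((link.lookup "type" = some "content" ∨ link.lookup "type" = some "reference") →
      link.lookup "title" ≠ none ∧ link.lookup "link" ≠ none)
instance (document_links : List (List (String × String))) : Decidable (Pre_format_document_links_for_embedding document_links) := by unfold Pre_format_document_links_for_embedding; infer_instance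
def pvWitness_format_document_links_for_embedding : (List (List (String × String))) :=
  [[("type", "content"), ("title", "Doc"), ("link", "http://x")], [("type", "other")]]
def Spec_format_document_links_for_embedding (document_links : List (List (String × String))) (out : String) : Prop := out = format_document_links_for_embedding_alt document_links
instance (document_links : List (List (String × String))) (out : String) : Decidable (Spec_format_document_links_for_embedding document_links out) := by unfold Spec_format_document_links_for_embedding; infer_instance

-- ===== CLAIM (what is proved, stated in full; the proofs are below) =====
def Claim_equal_format_document_links_for_embedding : Prop := ∀ (document_links : List (List (String × String))), Dom_format_document_links_for_embedding document_links → Pre_format_document_links_for_embedding document_links → Spec_format_document_links_for_embedding document_links (format_document_links_for_embedding document_links)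

-- ===== LEMMAS AND PROOFS =====

-- the numbered line both programs emit for one link
def pvLine (i : Int) (d : List (String × String)) : String :=
  PySem.Int.toStr i ++ ". " ++ ((d.lookup "title").getD "") ++ " - " ++ ((d.lookup "link").getD "") ++ "\n"

-- the body of a section: the lines of its docs numbered from i
def pvBody (docs : List (List (String × String))) (i : Int) : String :=
  match docs with
  | [] => ""
  | d :: ds => pvLine i d ++ pvBody ds (i + 1)

def pvIsC (link : List (String × String)) : Bool := ((link.lookup "type").getD "") == "content"
def pvIsR (link : List (String × String)) : Bool := ((link.lookup "type").getD "") == "reference"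

-- A's section loop appends the section body to its accumulator
theorem pvFoldA (docs : List (List (String × String))) (i : Int) (acc : String) :
    (docs.foldl
      (fun (p : Int × String) link_info =>
        (p.1 + 1, p.2 ++ PySem.Int.toStr p.1 ++ ". " ++ ((link_info.lookup "title").getD "") ++ " - " ++ ((link_info.lookup "link").getD "") ++ "\n"))
      (i, acc)).2 = acc ++ pvBody docs i := by
  induction docs generalizing i acc with
  | nil => simp [pvBody]
  | cons d ds ih =>
      simp only [List.foldl_cons, pvBody]
      rw [ih]
      simp [pvLine, String.append_assoc]

-- B's single pass produces the two section lengths and section bodies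
theorem pvFoldB (dl : List (List (String × String))) (ci ri : Int) (cb rb : String) :
    dl.foldl
      (fun (s : Int × Int × String × String) link =>
        let t := (link.lookup "type").getD ""
        if t == "content" then
          (s.1 + 1, s.2.1,
           s.2.2.1 ++ PySem.Int.toStr (s.1 + 1) ++ ". " ++ ((link.lookup "title").getD "") ++ " - " ++ ((link.lookup "link").getD "") ++ "\n",
           s.2.2.2)
        else if t == "reference" then
          (s.1, s.2.1 + 1, s.2.2.1,
           s.2.2.2 ++ PySem.Int.toStr (s.2.1 + 1) ++ ". " ++ ((link.lookup "title").getD "") ++ " - " ++ ((link.lookup "link").getD "") ++ "\n")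
        else s)
      (ci, ri, cb, rb)
    = (ci + ((dl.filter (fun link => ((link.lookup "type").getD "") == "content")).length : Int),
       ri + ((dl.filter (fun link => ((link.lookup "type").getD "") == "reference")).length : Int),
       cb ++ pvBody (dl.filter (fun link => ((link.lookup "type").getD "") == "content")) (ci + 1),
       rb ++ pvBody (dl.filter (fun link => ((link.lookup "type").getD "") == "reference")) (ri + 1)) := by
  induction dl generalizing ci ri cb rb with
  | nil => simp [pvBody]
  | cons d ds ih =>
      by_cases hc : (((d.lookup "type").getD "") == "content") = true
      · have hr : (((d.lookup "type").getD "") == "reference") = false := by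
          simp at hc ⊢; simp [hc]
        simp only [List.foldl_cons, List.filter_cons, hc, hr, Bool.false_eq_true, if_true, if_false]
        rw [ih]
        simp [pvBody, pvLine, String.append_assoc, Prod.ext_iff]
        all_goals omega
      · by_cases hr : (((d.lookup "type").getD "") == "reference") = true
        · have hc' : (((d.lookup "type").getD "") == "content") = false := by
            simpa using hc
          simp only [List.foldl_cons, List.filter_cons, hc', hr, Bool.false_eq_true, if_true, if_false]
          rw [ih]
          simp [pvBody, pvLine, String.append_assoc, Prod.ext_iff]
          all_goals omega
        · have hc' : (((d.lookup "type").getD "") == "content") = false := by simpa using hc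
          have hr' : (((d.lookup "type").getD "") == "reference") = false := by simpa using hr
          simp only [List.foldl_cons, List.filter_cons, hc', hr', Bool.false_eq_true, if_false]
          exact ih ci ri cb rb


-- pvFoldA with the appends right-associated (the form simp normalises to)
theorem pvFoldA' (docs : List (List (String × String))) (i : Int) (acc : String) :
    (docs.foldl
      (fun (p : Int × String) link_info =>
        (p.1 + 1, p.2 ++ (PySem.Int.toStr p.1 ++ (". " ++ (((link_info.lookup "title").getD "") ++ (" - " ++ (((link_info.lookup "link").getD "") ++ "\n")))))))
      (i, acc)).2 = acc ++ pvBody docs i := by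
  simpa [String.append_assoc] using pvFoldA docs i acc

-- ===== VERDICT (by name: the statement is the Claim_ definition above) =====
theorem format_document_links_for_embedding_spec : Claim_equal_format_document_links_for_embedding := by
  intro dl _ _
  unfold Spec_format_document_links_for_embedding
  unfold format_document_links_for_embedding format_document_links_for_embedding_alt
  by_cases h0 : dl = []
  · simp [h0]
  · simp only [h0, if_false]
    rw [pvFoldB]
    simp only [zero_add]
    by_cases hc : dl.filter (fun link => ((link.lookup "type").getD "") == "content") = [] <;>
      by_cases hr : dl.filter (fun link => ((link.lookup "type").getD "") == "reference") = [] <;>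
        simp [hc, hr, pvFoldA', String.append_assoc]
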